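-- pv_equiv track=rewrite | github.com/amtsu/team22 | users/vvbykov/exercise/hw9/hw9_functions.py | check_repeated_symbols
-- ===== SOURCE A (Python) =====
-- def check_repeated_symbols(s: str) -> dict:
--     strList = list(s.lower())
--     outDict = {}
--     for char in strList:
--         amount = strList.count(char)
--         if (amount > 1) and not (char in outDict.keys()):
--             outDict[char] = amount
--
--     return outDict
-- ===== SOURCE B (Python) =====
-- def check_repeated_symbols(s: str) -> dict:
--     counts = {}
--     for char in s.lower():
--         counts[char] = counts.get(char, 0) + 1
--     return {char: n for char, n in counts.items() if n > 1}
-- ===== Notes on version B (the rewrite author's own statement) =====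
-- stated objective: faster
-- what changed: B builds the character counts in one pass with a counter dict and then filters it, instead of A's per-element full-list .count() scan with an in-dict membership check.
import Mathlib
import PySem

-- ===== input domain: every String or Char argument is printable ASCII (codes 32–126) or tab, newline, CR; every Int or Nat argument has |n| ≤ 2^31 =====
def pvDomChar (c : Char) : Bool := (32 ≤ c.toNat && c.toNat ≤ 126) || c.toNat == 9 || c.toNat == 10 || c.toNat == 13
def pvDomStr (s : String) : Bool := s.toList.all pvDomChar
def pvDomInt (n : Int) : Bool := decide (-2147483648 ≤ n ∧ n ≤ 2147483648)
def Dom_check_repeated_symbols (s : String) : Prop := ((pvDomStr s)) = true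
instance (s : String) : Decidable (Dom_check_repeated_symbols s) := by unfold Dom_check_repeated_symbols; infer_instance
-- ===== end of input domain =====

-- B replaces A's quadratic per-character .count() scan by a single counting pass plus a filter (faster).


-- ===== PORT A =====
def check_repeated_symbols (s : String) : List (String × Int) :=
  let strList := (PySem.Str.lower s).toList
  (strList.foldl
    (fun d c =>
      let amount : Int := (PySem.List.count strList c : Int)
      if (1 < amount) && !(d.contains (String.ofList [c])) then
        d.insert (String.ofList [c]) amount
      else d)
    (PySem.Dict.empty : PySem.Dict String Int)).items

-- ===== PORT B =====
def check_repeated_symbols_alt (s : String) : List (String × Int) :=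
  let cs := (PySem.Str.lower s).toList
  let counts := cs.foldl
    (fun d c => d.insert (String.ofList [c]) (d.getD (String.ofList [c]) 0 + 1))
    (PySem.Dict.empty : PySem.Dict String Int)
  ((counts.items.filter (fun p => decide (1 < p.2))).foldl
    (fun d p => d.insert p.1 p.2)
    (PySem.Dict.empty : PySem.Dict String Int)).items

-- ===== PRECONDITION & SPEC =====
def Spec_check_repeated_symbols (s : String) (out : List (String × Int)) : Prop := out = check_repeated_symbols_alt s
instance (s : String) (out : List (String × Int)) : Decidable (Spec_check_repeated_symbols s out) := by unfold Spec_check_repeated_symbols; infer_instance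

-- ===== CLAIM (what is proved, stated in full; the proofs are below) =====
def Claim_equal_check_repeated_symbols : Prop := ∀ (s : String), Dom_check_repeated_symbols s → Spec_check_repeated_symbols s (check_repeated_symbols s)

-- ===== LEMMAS AND PROOFS =====

-- the key used for a character: the one-character string
def pvKey (c : Char) : String := String.ofList [c]

theorem pvKey_inj : Function.Injective pvKey := by
  intro a b h
  have h2 := congrArg String.toList h
  simp only [pvKey, String.toList_ofList, List.cons.injEq, and_true] at h2
  exact h2

theorem pvKey_beq (a b : Char) : (pvKey a == pvKey b) = (a == b) := by
  by_cases h : a = b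
  · simp [h]
  · have hne : pvKey a ≠ pvKey b := fun hk => h (pvKey_inj hk)
    simp [h, hne]

-- A's loop, characterised: with fixed full-count function, the items produced
theorem A_fold (cnt : Char → Int) :
    ∀ (l : List Char) (d : PySem.Dict String Int), d.keys.Nodup →
      (l.foldl
        (fun d c =>
          if (1 < cnt c) && !(d.contains (pvKey c)) then d.insert (pvKey c) (cnt c) else d) d).items
      = d.items ++
        ((PySem.Set.ofList l).filter
          (fun c => !(d.contains (pvKey c)) && decide (1 < cnt c))).map
          (fun c => (pvKey c, cnt c)) := by
  intro l
  induction l with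
  | nil => intro d hd; simp [PySem.Set.ofList]
  | cons c t ih =>
    intro d hd
    rw [List.foldl_cons, PySem.Set.ofList_cons]
    by_cases hcnt : (1 : Int) < cnt c
    · by_cases hcon : d.contains (pvKey c) = true
      · -- already a key: skipped, and filter drops c too
        rw [if_neg (by simp [hcon]), ih d hd,
          List.filter_cons_of_neg (by simp [hcon])]
        refine congrArg _ (congrArg _ ?_)
        simp only [PySem.Set.discard, List.filter_filter]
        refine (List.filter_congr ?_).symm
        intro x hx
        by_cases hxc : x = c
        · simp [hxc, hcon]
        · simp [hxc]
      · -- fresh repeated char: inserted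
        have hcon' : d.contains (pvKey c) = false := by simpa using hcon
        rw [if_pos (by simp [hcnt, hcon']),
          ih (d.insert (pvKey c) (cnt c)) (PySem.Dict.nodup_keys_insert d _ _ hd),
          PySem.Dict.items_insert_of_not_contains d _ hcon',
          List.filter_cons_of_pos (by simp [hcon', hcnt])]
        simp only [List.append_assoc, List.map_cons, List.cons_append, List.nil_append]
        refine congrArg _ (congrArg _ (congrArg _ ?_))
        simp only [PySem.Set.discard, List.filter_filter]
        refine (List.filter_congr ?_).symm
        intro x hx
        by_cases hxc : x = c
        · simp [hxc]
        · simp only [PySem.Dict.contains_insert, pvKey_beq, Bool.not_or]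
          cases d.contains (pvKey x) <;> cases x == c <;> cases decide (1 < cnt x) <;> rfl
    · -- count ≤ 1: never inserted, filter drops c
      rw [if_neg (by simp [hcnt]), ih d hd,
        List.filter_cons_of_neg (by simp [hcnt])]
      refine congrArg _ (congrArg _ ?_)
      simp only [PySem.Set.discard, List.filter_filter]
      refine (List.filter_congr ?_).symm
      intro x hx
      by_cases hxc : x = c
      · simp [hxc, hcnt]
      · simp [hxc]

-- set(map pvKey l) is map pvKey (set l)
theorem ofList_map_pvKey : ∀ (l : List Char),
    PySem.Set.ofList (l.map pvKey) = (PySem.Set.ofList l).map pvKey := by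
  intro l
  induction l with
  | nil => simp [PySem.Set.ofList]
  | cons c t ih =>
    rw [List.map_cons, PySem.Set.ofList_cons, PySem.Set.ofList_cons, ih]
    simp only [List.map_cons, List.cons.injEq, true_and]
    simp only [PySem.Set.discard, List.filter_map]
    congr 1
    apply List.filter_congr
    intro x hx
    simp [pvKey_beq]

-- ===== VERDICT (by name: the statement is the Claim_ definition above) =====
set_option maxHeartbeats 1000000 in
theorem check_repeated_symbols_spec : Claim_equal_check_repeated_symbols := by
  intro s _
  unfold Spec_check_repeated_symbols check_repeated_symbols check_repeated_symbols_alt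
  set cs := (PySem.Str.lower s).toList with hcs
  -- A side
  have hA := A_fold (fun c => (PySem.List.count cs c : Int)) cs PySem.Dict.empty (by simp)
  simp only [pvKey] at hA
  rw [hA]
  -- B side: the counting loop is Counter(map pvKey cs)
  have hB1 : cs.foldl
      (fun d c => d.insert (String.ofList [c]) (d.getD (String.ofList [c]) 0 + 1))
      (PySem.Dict.empty : PySem.Dict String Int)
      = PySem.Dict.counter (cs.map pvKey) := by
    rw [← PySem.Dict.foldl_insert_getD_add_one_eq_counter, List.foldl_map]
    rfl
  simp only [hB1, PySem.Dict.items_counter, ofList_map_pvKey, List.map_map, List.filter_map]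
  have hfresh : ∀ (l : List (String × Int)), (l.map Prod.fst).Nodup →
      (l.foldl (fun d p => d.insert p.1 p.2) (PySem.Dict.empty : PySem.Dict String Int)).items = l := by
    intro l hl
    simpa using PySem.Dict.items_foldl_insert_fresh l Prod.fst Prod.snd PySem.Dict.empty (by simp) hl
  rw [hfresh _ (by
    simp only [List.map_map]
    exact ((PySem.Set.nodup_ofList cs).filter _).map pvKey_inj)]
  simp only [show (PySem.Dict.empty : PySem.Dict String Int).items = [] from rfl, List.nil_append]
  congr 1
  · funext x
    simp only [PySem.List.count]
    exact congrArg (fun n : Nat => (String.ofList [x], (n : Int))) (List.count_map_of_injective cs pvKey pvKey_inj x).symm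
  · apply List.filter_congr
    intro x hx
    simp [PySem.List.count]
    rw [List.count_map_of_injective cs pvKey pvKey_inj x]
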